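-- pv_equiv track=rewrite | github.com/hjs0522/Algorithm | 5주차.py | solution
-- ===== SOURCE A (Python) =====
-- def solution(word):
--     answer = 0
--
--     for i in range(len(word)):
--         temp = 0
--         for j in range(5-i):
--             temp += 5**j
--
--         if word[i] == 'A':
--             answer += 1
--         elif word[i] == 'E':
--             answer += temp+1
--         elif word[i] == 'I':
--             answer += 2*temp+1
--         elif word[i] == 'O':
--             answer += 3*temp+1
--         else:
--             answer += 4*temp+1
--     return answer
-- ===== SOURCE B (Python) =====
-- _DIGIT = {'A': 0, 'E': 1, 'I': 2, 'O': 3}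
--
--
-- def solution(word):
--     total = len(word)
--     place = 781  # 1 + 5 + 25 + 125 + 625: A's inner geometric sum at position 0
--     for ch in word[:5]:
--         total += _DIGIT.get(ch, 4) * place
--         place = (place - 1) // 5
--     return total
-- ===== Notes on version B (the rewrite author's own statement) =====
-- stated objective: faster
-- what changed: The nested loops (an inner geometric-sum loop per character, run over every character) are replaced by a single pass over at most the first five characters, keeping a running place value updated by place = (place-1)//5 and charging every character's +1 through len(word); the if/elif digit chain becomes a dict lookup with default 4.
import Mathlib
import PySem

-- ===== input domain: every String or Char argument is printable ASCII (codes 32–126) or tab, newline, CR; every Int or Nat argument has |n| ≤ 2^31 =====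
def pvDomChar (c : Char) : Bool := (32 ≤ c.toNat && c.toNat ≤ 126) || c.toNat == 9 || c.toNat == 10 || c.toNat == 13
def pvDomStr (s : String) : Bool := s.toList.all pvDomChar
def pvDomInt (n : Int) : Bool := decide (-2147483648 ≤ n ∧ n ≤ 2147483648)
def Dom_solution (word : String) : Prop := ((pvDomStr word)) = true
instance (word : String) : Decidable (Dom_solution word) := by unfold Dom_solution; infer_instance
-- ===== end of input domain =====

-- B replaces A's inner geometric-sum loop by a running place value and iterates only word[:5],
-- charging the remaining characters through len(word) (objective: faster, measured).

-- ===== PORT A =====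
def solution (word : String) : Int :=
  (PySem.List.pyRange 0 (PySem.Str.len word) 1).foldl (fun answer i =>
    -- temp = sum of 5**j for j in range(5-i); j ≥ 0 on every iteration, so 5**j = 5 ^ j.toNat
    let temp : Int := (PySem.List.pyRange 0 (5 - i) 1).foldl (fun t j => t + 5 ^ j.toNat) 0
    let c := PySem.List.pyGetD word.toList i ' '  -- word[i]; i is always in range here
    if c = 'A' then answer + 1
    else if c = 'E' then answer + (temp + 1)
    else if c = 'I' then answer + (2 * temp + 1)
    else if c = 'O' then answer + (3 * temp + 1)
    else answer + (4 * temp + 1)) 0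

-- ===== PORT B =====
def digitTable : PySem.Dict Char Int := PySem.Dict.ofList [('A', 0), ('E', 1), ('I', 2), ('O', 3)]

def solution_alt (word : String) : Int :=
  ((PySem.Str.slice word none (some 5)).toList.foldl
    (fun (tp : Int × Int) ch =>
      (tp.1 + digitTable.getD ch 4 * tp.2, PySem.Int.floordiv (tp.2 - 1) 5))
    (PySem.Str.len word, 781)).1

-- ===== PRECONDITION & SPEC =====
def Spec_solution (word : String) (out : Int) : Prop := out = solution_alt word
instance (word : String) (out : Int) : Decidable (Spec_solution word out) := by unfold Spec_solution; infer_instance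

-- ===== CLAIM (what is proved, stated in full; the proofs are below) =====
def Claim_equal_solution : Prop := ∀ (word : String), Dom_solution word → Spec_solution word (solution word)

-- ===== LEMMAS AND PROOFS =====

-- the digit value of one character (common to both branch structures)
def dig (c : Char) : Int :=
  if c = 'A' then 0 else if c = 'E' then 1 else if c = 'I' then 2 else if c = 'O' then 3 else 4

-- A's inner loop as a function of the position
def tempA (i : Int) : Int :=
  (PySem.List.pyRange 0 (5 - i) 1).foldl (fun t j => t + 5 ^ j.toNat) 0

-- recursive characterisation of A's outer loop (suffix, starting position)
def aSum : List Char → Int → Int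
  | [], _ => 0
  | c :: cs, i => dig c * tempA i + 1 + aSum cs (i + 1)

-- recursive characterisation of B's loop (remaining chars, current place value)
def bSum : List Char → Int → Int
  | [], _ => 0
  | c :: cs, p => dig c * p + bSum cs (PySem.Int.floordiv (p - 1) 5)

lemma dig_getD (c : Char) : digitTable.getD c 4 = dig c := by
  have hmk : digitTable = PySem.Dict.mk [('A', 0), ('E', 1), ('I', 2), ('O', 3)] := by decide
  rw [hmk, dig]
  simp only [PySem.Dict.getD_eq_get?_getD, PySem.Dict.get?_mk_cons, beq_iff_eq]
  split_ifs <;> first | rfl | (exfalso; simp_all [eq_comm])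

lemma lemA (suf : List Char) : ∀ (pre : List Char) (acc : Int),
    (PySem.List.pyRange pre.length (pre.length + suf.length) 1).foldl (fun answer i =>
      if PySem.List.pyGetD (pre ++ suf) i ' ' = 'A' then answer + 1
      else if PySem.List.pyGetD (pre ++ suf) i ' ' = 'E' then
        answer + ((PySem.List.pyRange 0 (5 - i) 1).foldl (fun t j => t + 5 ^ j.toNat) 0 + 1)
      else if PySem.List.pyGetD (pre ++ suf) i ' ' = 'I' then
        answer + (2 * (PySem.List.pyRange 0 (5 - i) 1).foldl (fun t j => t + 5 ^ j.toNat) 0 + 1)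
      else if PySem.List.pyGetD (pre ++ suf) i ' ' = 'O' then
        answer + (3 * (PySem.List.pyRange 0 (5 - i) 1).foldl (fun t j => t + 5 ^ j.toNat) 0 + 1)
      else answer + (4 * (PySem.List.pyRange 0 (5 - i) 1).foldl (fun t j => t + 5 ^ j.toNat) 0 + 1)) acc
    = acc + aSum suf pre.length := by
  induction suf with
  | nil => intro pre acc; simp [PySem.List.pyRange_one_eq_nil, aSum]
  | cons c cs ih =>
    intro pre acc
    have hlt : (pre.length : Int) < (pre.length : Int) + ((c :: cs).length : Int) := by
      push_cast [List.length_cons]; omega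
    rw [PySem.List.pyRange_one_cons hlt, List.foldl_cons]
    have happ : pre ++ c :: cs = (pre ++ [c]) ++ cs := by simp
    have hget : PySem.List.pyGetD (pre ++ c :: cs) (pre.length : Int) ' ' = c := by
      simp [PySem.List.pyGetD]
    have hshift : ((pre.length : Int) + 1) = ((pre ++ [c]).length : Int) := by
      push_cast [List.length_append, List.length_cons, List.length_nil]; omega
    have hlen2 : (pre.length : Int) + ((c :: cs).length : Int)
        = ((pre ++ [c]).length : Int) + (cs.length : Int) := by
      push_cast [List.length_append, List.length_cons, List.length_nil]; omega
    rw [hlen2, hshift, happ, ih (pre ++ [c])]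
    rw [← happ]
    simp only [hget, aSum, dig, tempA, ← hshift]
    split_ifs <;> ring

lemma lemB (M : List Char) : ∀ (t p : Int),
    (M.foldl (fun (tp : Int × Int) ch =>
      (tp.1 + digitTable.getD ch 4 * tp.2, PySem.Int.floordiv (tp.2 - 1) 5)) (t, p)).1
    = t + bSum M p := by
  induction M with
  | nil => intro t p; simp [bSum]
  | cons c cs ih =>
    intro t p
    rw [List.foldl_cons, ih]
    simp only [bSum, dig_getD]
    ring

lemma tempA_ge (i : Nat) (h : 5 ≤ i) : tempA i = 0 := by
  rw [tempA, PySem.List.pyRange_one_eq_nil (by omega)]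
  rfl

lemma tempA_step (i : Nat) (h : i < 5) :
    PySem.Int.floordiv (tempA i - 1) 5 = tempA ((i : Int) + 1) := by
  interval_cases i <;> decide

lemma combine (L : List Char) : ∀ (i : Nat),
    aSum L i = (L.length : Int) + bSum (L.take (5 - i)) (tempA i) := by
  induction L with
  | nil => intro i; simp [aSum, bSum]
  | cons c cs ih =>
    intro i
    by_cases h : i < 5
    · have htake : (c :: cs).take (5 - i) = c :: cs.take (5 - (i + 1)) := by
        have h5 : 5 - i = (5 - (i + 1)) + 1 := by omega
        simp [h5]
      rw [htake]
      simp only [aSum, bSum, tempA_step i h]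
      have hc : ((i : Int) + 1) = ((i + 1 : Nat) : Int) := by push_cast; ring
      rw [hc, ih (i + 1)]
      push_cast [List.length_cons]
      ring
    · have htake : (c :: cs).take (5 - i) = [] := by
        have h5 : 5 - i = 0 := by omega
        simp [h5]
      rw [htake]
      simp only [aSum, bSum, tempA_ge i (by omega)]
      have hc : ((i : Int) + 1) = ((i + 1 : Nat) : Int) := by push_cast; ring
      rw [hc, ih (i + 1)]
      have htake2 : cs.take (5 - (i + 1)) = [] := by
        have h5 : 5 - (i + 1) = 0 := by omega
        simp [h5]
      rw [htake2]
      simp only [bSum]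
      push_cast [List.length_cons]
      ring

lemma solution_eq (word : String) : solution word = aSum word.toList 0 := by
  have h := lemA word.toList [] 0
  simp only [List.nil_append, List.length_nil, Nat.cast_zero, zero_add] at h
  rw [solution, PySem.Str.len_eq]
  exact h

lemma solution_alt_eq (word : String) :
    solution_alt word = (word.toList.length : Int) + bSum (word.toList.take 5) 781 := by
  rw [solution_alt]
  have hs : (PySem.Str.slice word none (some 5)).toList = word.toList.take 5 := by
    simp [pysem]
  rw [hs, lemB, PySem.Str.len_eq]

-- ===== VERDICT (by name: the statement is the Claim_ definition above) =====
theorem solution_spec : Claim_equal_solution := by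
  intro word _
  unfold Spec_solution
  rw [solution_eq, solution_alt_eq]
  have h := combine word.toList 0
  have h781 : tempA ((0 : Nat) : Int) = 781 := by decide
  rw [h781] at h
  simpa using h
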